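-- pv_equiv track=rewrite | github.com/carlos2285/formulario | app.py | combinar_datos
-- ===== SOURCE A (Python) =====
-- def combinar_datos(front: dict, back: dict) -> dict:
--     # Combina datos de frente y reverso dando prioridad al MRZ
--     datos = {}
--     datos.update(front)
--     for k, v in back.items():
--         if k in ["numero_doc", "apellidos", "nombres"]:
--             if v:
--                 datos[k] = v
--         else:
--             if v and not datos.get(k):
--                 datos[k] = v
--     return datos
-- ===== SOURCE B (Python) =====
-- def combinar_datos(front: dict, back: dict) -> dict:
--     # Resolve each key once from a precomputed key order (front keys, then new back keys).
--     mrz = ("numero_doc", "apellidos", "nombres")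
--
--     def resolver(k):
--         if k in mrz:
--             bv = back.get(k)
--             return bv if bv else front.get(k)
--         fv = front.get(k)
--         if fv:
--             return fv
--         bv = back.get(k)
--         return bv if bv else fv
--
--     claves = list(front) + [k for k in back if k not in front]
--     return {k: v for k in claves if (v := resolver(k)) is not None}
-- ===== Notes on version B (the rewrite author's own statement) =====
-- stated objective: alternative
-- what changed: Instead of copying front and conditionally overwriting it while scanning back, B computes the output key order up front (front keys, then back-only keys) and resolves each key's value once by a per-key rule (MRZ keys prefer back's truthy value, others prefer front's), keeping a key only if a value exists.
import Mathlib
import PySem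

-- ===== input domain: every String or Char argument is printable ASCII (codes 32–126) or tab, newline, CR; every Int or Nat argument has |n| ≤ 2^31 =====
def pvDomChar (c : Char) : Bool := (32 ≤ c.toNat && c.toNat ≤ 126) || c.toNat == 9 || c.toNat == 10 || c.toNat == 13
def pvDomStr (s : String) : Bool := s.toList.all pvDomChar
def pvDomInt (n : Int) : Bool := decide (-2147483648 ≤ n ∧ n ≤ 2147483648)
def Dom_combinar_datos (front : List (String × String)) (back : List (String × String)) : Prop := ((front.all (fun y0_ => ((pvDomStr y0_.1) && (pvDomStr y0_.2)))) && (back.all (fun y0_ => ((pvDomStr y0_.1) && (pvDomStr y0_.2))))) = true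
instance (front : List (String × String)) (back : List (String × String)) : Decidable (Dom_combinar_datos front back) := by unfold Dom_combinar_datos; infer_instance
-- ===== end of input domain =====

-- B resolves each key once from a precomputed key order (front keys, then new back keys) instead of
-- A's copy-then-update scan; objective: alternative decomposition, same cost.

-- ===== PORT A =====
-- truthiness of an optional string (Python: None and "" are falsy)
def pvTruthy (o : Option String) : Bool :=
  match o with
  | some s => !(s == "")
  | none => false

-- one iteration of A's `for k, v in back.items()` loop body
def pvStepA (d : PySem.Dict String String) (p : String × String) : PySem.Dict String String :=
  if p.1 ∈ (["numero_doc", "apellidos", "nombres"] : List String) then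
    if p.2 ≠ "" then d.insert p.1 p.2 else d
  else
    if p.2 ≠ "" ∧ pvTruthy (d.get? p.1) = false then d.insert p.1 p.2 else d

def combinar_datos (front : List (String × String)) (back : List (String × String)) : List (String × String) :=
  let datos := front.foldl (fun d p => d.insert p.1 p.2) PySem.Dict.empty
  (back.foldl pvStepA datos).items

-- ===== PORT B =====
def pvMRZ : List String := ["numero_doc", "apellidos", "nombres"]

-- Source B's `resolver(k)`; `front.get(k)` / `back.get(k)` is first-match lookup in the assoc list
def pvResolver (front : List (String × String)) (back : List (String × String)) (k : String) : Option String :=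
  if k ∈ pvMRZ then
    let bv := back.lookup k
    if pvTruthy bv then bv else front.lookup k
  else
    let fv := front.lookup k
    if pvTruthy fv then fv
    else
      let bv := back.lookup k
      if pvTruthy bv then bv else fv

def combinar_datos_alt (front : List (String × String)) (back : List (String × String)) : List (String × String) :=
  let claves := front.map Prod.fst ++ (back.map Prod.fst).filter (fun k => !(front.map Prod.fst).contains k)
  (claves.foldl
    (fun d k =>
      match pvResolver front back k with
      | some v => d.insert k v
      | none => d)
    PySem.Dict.empty).items

-- ===== PRECONDITION & SPEC =====
-- The assoc lists encode Python dicts, whose keys are unique by construction; a duplicate-key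
-- list corresponds to no Python input, so Pre_ excludes no input the Python A accepts.
def Pre_combinar_datos (front : List (String × String)) (back : List (String × String)) : Prop :=
  (front.map Prod.fst).Nodup ∧ (back.map Prod.fst).Nodup
instance (front : List (String × String)) (back : List (String × String)) : Decidable (Pre_combinar_datos front back) := by unfold Pre_combinar_datos; infer_instance

def pvWitness_combinar_datos : (List (String × String)) × (List (String × String)) :=
  ([("nombres", "JUAN"), ("extra", "")], [("nombres", ""), ("numero_doc", "X1"), ("extra", "z")])

def Spec_combinar_datos (front : List (String × String)) (back : List (String × String)) (out : List (String × String)) : Prop := out = combinar_datos_alt front back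
instance (front : List (String × String)) (back : List (String × String)) (out : List (String × String)) : Decidable (Spec_combinar_datos front back out) := by unfold Spec_combinar_datos; infer_instance

-- ===== CLAIM (what is proved, stated in full; the proofs are below) =====
def Claim_equal_combinar_datos : Prop := ∀ (front : List (String × String)) (back : List (String × String)), Dom_combinar_datos front back → Pre_combinar_datos front back → Spec_combinar_datos front back (combinar_datos front back)

-- ===== LEMMAS AND PROOFS =====

-- what A's whole back loop does to one entry of datos (the final value stored under that key)
def pvG (back : List (String × String)) (p : String × String) : String × String :=
  match back.lookup p.1 with
  | none => p
  | some bv =>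
    if p.1 ∈ pvMRZ then (if bv ≠ "" then (p.1, bv) else p)
    else (if p.2 = "" ∧ bv ≠ "" then (p.1, bv) else p)

theorem pv_lookup_none (bs : List (String × String)) (k : String) (h : k ∉ bs.map Prod.fst) : bs.lookup k = none := by
  rw [List.lookup_eq_none_iff]
  intro a ha
  simp only [bne_iff_ne, ne_eq]
  intro hka
  exact h (hka ▸ List.mem_map.mpr ⟨a, ha, rfl⟩)

theorem pv_lookup_mem (l : List (String × String)) (p : String × String) (hp : p ∈ l) (h : (l.map Prod.fst).Nodup) : l.lookup p.1 = some p.2 := by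
  induction l with
  | nil => cases hp
  | cons q l ih =>
    simp only [List.map_cons, List.nodup_cons] at h
    rw [List.lookup_cons]
    cases hp with
    | head => simp
    | tail _ hp =>
      have hne : p.1 ≠ q.1 := by
        intro e
        exact h.1 (e ▸ List.mem_map.mpr ⟨p, hp, rfl⟩)
      have : (p.1 == q.1) = false := by simpa using hne
      rw [this]
      exact ih hp h.2

theorem pvG_cons_ne (k v : String) (bs : List (String × String)) (p : String × String) (h : p.1 ≠ k) :
    pvG ((k, v) :: bs) p = pvG bs p := by
  unfold pvG
  rw [List.lookup_cons]
  have : (p.1 == k) = false := by simpa using h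
  rw [this]

theorem pvG_not_mem (bs : List (String × String)) (p : String × String) (h : p.1 ∉ bs.map Prod.fst) :
    pvG bs p = p := by
  unfold pvG
  rw [pv_lookup_none bs p.1 h]

theorem pvG_cons_self (k v : String) (bs : List (String × String)) (p : String × String) (h : p.1 = k) :
    pvG ((k, v) :: bs) p =
      (if p.1 ∈ pvMRZ then (if v ≠ "" then (p.1, v) else p)
       else (if p.2 = "" ∧ v ≠ "" then (p.1, v) else p)) := by
  unfold pvG
  rw [List.lookup_cons]
  have : (p.1 == k) = true := by simpa using h
  rw [this]

theorem pv_foldA (back : List (String × String)) (d : PySem.Dict String String)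
    (hd : d.keys.Nodup) (hb : (back.map Prod.fst).Nodup) :
    (back.foldl pvStepA d).items =
      d.items.map (pvG back) ++ back.filter (fun p => !(p.2 == "") && !(d.contains p.1)) := by
  induction back generalizing d with
  | nil =>
    simp only [List.foldl_nil, List.filter_nil, List.append_nil]
    rw [List.map_congr_left (g := fun p => p) (fun p _ => pvG_not_mem [] p (by simp))]
    simp
  | cons b bs ih =>
    obtain ⟨k, v⟩ := b
    simp only [List.map_cons, List.nodup_cons] at hb
    have hknotbs : k ∉ bs.map Prod.fst := hb.1
    have hstep_nodup : (pvStepA d (k, v)).keys.Nodup := by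
      unfold pvStepA
      split_ifs <;> first | exact PySem.Dict.nodup_keys_insert _ _ _ hd | exact hd
    rw [List.foldl_cons, ih (pvStepA d (k, v)) hstep_nodup hb.2]
    have hfilter : bs.filter (fun p => !(p.2 == "") && !((pvStepA d (k, v)).contains p.1))
        = bs.filter (fun p => !(p.2 == "") && !(d.contains p.1)) := by
      apply List.filter_congr
      intro p hp
      have hne : (p.1 == k) = false := by
        simp only [beq_eq_false_iff_ne, ne_eq]
        intro e
        exact hknotbs (e ▸ List.mem_map.mpr ⟨p, hp, rfl⟩)
      have : (pvStepA d (k, v)).contains p.1 = d.contains p.1 := by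
        unfold pvStepA
        split_ifs <;> simp [PySem.Dict.contains_insert, hne]
      rw [this]
    rw [hfilter]
    have hGkv : pvG bs (k, v) = (k, v) := pvG_not_mem bs (k, v) hknotbs
    by_cases hc : d.contains k = true
    · -- k already a key of datos: the head entry contributes nothing to the appended part
      have hget : ∀ p ∈ d.items, p.1 = k → d.get? k = some p.2 := by
        intro p hp e
        have := PySem.Dict.get?_of_mem_items d (k := p.1) (v := p.2) (by simpa using hp) hd
        rwa [e] at this
      have hmap : (pvStepA d (k, v)).items.map (pvG bs) = d.items.map (pvG ((k, v) :: bs)) := by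
        unfold pvStepA
        split_ifs with h1 h2 h3
        · -- MRZ, v ≠ ""
          rw [PySem.Dict.items_insert_of_contains d _ hc, List.map_map]
          apply List.map_congr_left
          intro p hp
          by_cases hpk : p.1 = k
          · simp only [Function.comp, hpk, beq_self_eq_true, if_pos]
            rw [pvG_not_mem bs (k, v) hknotbs, pvG_cons_self k v bs p hpk]
            have hkm : p.1 ∈ pvMRZ := by rw [hpk]; exact h1
            rw [if_pos hkm, if_pos h2, hpk]
          · have hbe : (p.1 == k) = false := by simpa using hpk
            simp only [Function.comp, hbe, Bool.false_eq_true, if_false]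
            exact (pvG_cons_ne k v bs p hpk).symm
        · -- MRZ, v = ""
          apply List.map_congr_left
          intro p hp
          by_cases hpk : p.1 = k
          · rw [pvG_cons_self k v bs p hpk, if_pos (by rw [hpk]; exact h1), if_neg h2]
            exact pvG_not_mem bs p (by rw [hpk]; exact hknotbs)
          · exact (pvG_cons_ne k v bs p hpk).symm
        · -- non-MRZ, v truthy and stored value falsy
          rw [PySem.Dict.items_insert_of_contains d _ hc, List.map_map]
          apply List.map_congr_left
          intro p hp
          by_cases hpk : p.1 = k
          · simp only [Function.comp, hpk, beq_self_eq_true, if_pos]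
            rw [pvG_not_mem bs (k, v) hknotbs, pvG_cons_self k v bs p hpk]
            rw [if_neg (by rw [hpk]; exact h1)]
            have hp2 : p.2 = "" := by
              have := hget p hp hpk
              have ht := h3.2
              rw [this] at ht
              simpa [pvTruthy] using ht
            rw [if_pos ⟨hp2, h3.1⟩, hpk]
          · have hbe : (p.1 == k) = false := by simpa using hpk
            simp only [Function.comp, hbe, Bool.false_eq_true, if_false]
            exact (pvG_cons_ne k v bs p hpk).symm
        · -- non-MRZ, no insert
          apply List.map_congr_left
          intro p hp
          by_cases hpk : p.1 = k
          · rw [pvG_cons_self k v bs p hpk, if_neg (by rw [hpk]; exact h1)]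
            have hcond : ¬(p.2 = "" ∧ v ≠ "") := by
              intro ⟨hp2, hv⟩
              apply h3
              refine ⟨hv, ?_⟩
              rw [hget p hp hpk, hp2]
              simp [pvTruthy]
            rw [if_neg hcond]
            exact pvG_not_mem bs p (by rw [hpk]; exact hknotbs)
          · exact (pvG_cons_ne k v bs p hpk).symm
      rw [hmap, List.filter_cons]
      simp only [hc, Bool.not_true, Bool.and_false, Bool.false_eq_true, if_neg, not_false_iff]
    · -- k is a fresh key
      have hcf : d.contains k = false := by simpa using hc
      have hnotkey : ∀ p ∈ d.items, p.1 ≠ k := by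
        intro p hp e
        apply hc
        rw [PySem.Dict.contains_iff_mem_keys]
        exact e ▸ List.mem_map.mpr ⟨p, hp, rfl⟩
      have hgetnone : d.get? k = none := (PySem.Dict.get?_eq_none_iff_contains d k).mpr hcf
      have hmapcongr : d.items.map (pvG bs) = d.items.map (pvG ((k, v) :: bs)) := by
        apply List.map_congr_left
        intro p hp
        exact (pvG_cons_ne k v bs p (hnotkey p hp)).symm
      unfold pvStepA
      split_ifs with h1 h2 h3
      · -- MRZ, inserted
        rw [PySem.Dict.items_insert_of_not_contains d _ hcf, List.map_append, hmapcongr]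
        simp only [List.map_cons, List.map_nil, hGkv]
        rw [List.filter_cons, if_pos (by simp [hcf, h2])]
        simp [List.append_assoc]
      · -- MRZ, v = ""
        rw [hmapcongr, List.filter_cons, if_neg (by simp [h2])]
      · -- non-MRZ, inserted
        rw [PySem.Dict.items_insert_of_not_contains d _ hcf, List.map_append, hmapcongr]
        simp only [List.map_cons, List.map_nil, hGkv]
        rw [List.filter_cons, if_pos (by simp [hcf, h3.1])]
        simp [List.append_assoc]
      · -- non-MRZ, not inserted: the value must be falsy
        have hv : v = "" := by
          by_contra hv
          exact h3 ⟨hv, by rw [hgetnone]; rfl⟩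
        rw [hmapcongr, List.filter_cons, if_neg (by simp [hv])]

theorem pv_res_front (front back : List (String × String)) (p : String × String)
    (hf : (front.map Prod.fst).Nodup) (hp : p ∈ front) :
    (pvResolver front back p.1).map (fun v => (p.1, v)) = some (pvG back p) := by
  have hfl : front.lookup p.1 = some p.2 := pv_lookup_mem front p hp hf
  unfold pvResolver pvG
  cases hbl : back.lookup p.1 with
  | none =>
    by_cases hm : p.1 ∈ pvMRZ
    · simp [hm, hfl, pvTruthy]
    · by_cases h2 : p.2 = ""
      · simp only [hm, hfl, pvTruthy, h2]
        simp
        rw [← h2]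
      · simp [hm, hfl, pvTruthy, h2]
  | some w =>
    by_cases hm : p.1 ∈ pvMRZ
    · by_cases hw : w = "" <;> simp [hm, hfl, pvTruthy, hw]
    · by_cases h2 : p.2 = ""
      · by_cases hw : w = ""
        · simp [hm, hfl, pvTruthy, h2, hw]
          rw [← h2]
        · simp [hm, hfl, pvTruthy, h2, hw]
      · simp [hm, hfl, pvTruthy, h2]

theorem pv_res_backonly (front back : List (String × String)) (p : String × String)
    (hb : (back.map Prod.fst).Nodup) (hp : p ∈ back) (hnf : p.1 ∉ front.map Prod.fst) :
    (pvResolver front back p.1).map (fun v => (p.1, v)) = if p.2 == "" then none else some p := by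
  have hfl : front.lookup p.1 = none := pv_lookup_none front p.1 hnf
  have hbl : back.lookup p.1 = some p.2 := pv_lookup_mem back p hp hb
  unfold pvResolver
  by_cases hm : p.1 ∈ pvMRZ
  · by_cases h2 : p.2 = "" <;> simp [hm, hfl, hbl, pvTruthy, h2]
  · by_cases h2 : p.2 = "" <;> simp [hm, hfl, hbl, pvTruthy, h2]

theorem pv_matchfold (ks : List String) (f : String → Option String) (d : PySem.Dict String String) :
    ks.foldl (fun d k => match f k with | some v => d.insert k v | none => d) d
      = (ks.filterMap (fun k => (f k).map (fun v => (k, v)))).foldl (fun d p => d.insert p.1 p.2) d := by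
  induction ks generalizing d with
  | nil => rfl
  | cons k ks ih =>
    simp only [List.foldl_cons, List.filterMap_cons]
    cases h : f k with
    | none => simp [ih]
    | some v => simp [ih]

theorem pv_map_fst_filterMap (l : List String) (f : String → Option String) :
    (l.filterMap (fun k => (f k).map (fun v => (k, v)))).map Prod.fst = l.filter (fun k => (f k).isSome) := by
  induction l with
  | nil => rfl
  | cons k l ih =>
    simp only [List.filterMap_cons, List.filter_cons]
    cases h : f k with
    | none => simpa [h] using ih
    | some v => simpa [h] using ih

theorem pv_filterMap_if (l : List (String × String)) (f : (String × String) → Bool) :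
    l.filterMap (fun p => if f p then none else some p) = l.filter (fun p => !f p) := by
  induction l with
  | nil => rfl
  | cons a l ih =>
    simp only [List.filterMap_cons, List.filter_cons]
    cases h : f a <;> simp [ih]

theorem pv_items_of_nodup (l : List (String × String)) (h : (l.map Prod.fst).Nodup) :
    (l.foldl (fun d p => d.insert p.1 p.2) PySem.Dict.empty).items = l := by
  have := PySem.Dict.items_foldl_insert_fresh l Prod.fst Prod.snd PySem.Dict.empty
    (fun a _ => by simp) h
  simpa using this

theorem pv_main (front : List (String × String)) (back : List (String × String))
    (hf : (front.map Prod.fst).Nodup) (hb : (back.map Prod.fst).Nodup) :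
    combinar_datos front back = combinar_datos_alt front back := by
  -- A side: the loop result, entrywise
  have hFitems := pv_items_of_nodup front hf
  set F := front.foldl (fun d p => d.insert p.1 p.2) PySem.Dict.empty with hFdef
  have hFkeys : F.keys = front.map Prod.fst := by
    show F.items.map Prod.fst = _
    rw [hFitems]
  have hFnodup : F.keys.Nodup := by rw [hFkeys]; exact hf
  have hA : combinar_datos front back =
      front.map (pvG back) ++ back.filter (fun p => !(p.2 == "") && !((front.map Prod.fst).contains p.1)) := by
    show (back.foldl pvStepA F).items = _
    rw [pv_foldA back F hFnodup hb, hFitems]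
    congr 1
    apply List.filter_congr
    intro p _
    have : F.contains p.1 = (front.map Prod.fst).contains p.1 := by
      rw [PySem.Dict.contains_eq_decide_mem_keys, hFkeys]
      simp
    rw [this]
  -- B side: the comprehension over the resolved keys
  have hg : combinar_datos_alt front back =
      ((front.map Prod.fst ++ (back.map Prod.fst).filter (fun k => !(front.map Prod.fst).contains k)).filterMap
        (fun k => (pvResolver front back k).map (fun v => (k, v)))) := by
    show ((front.map Prod.fst ++ (back.map Prod.fst).filter (fun k => !(front.map Prod.fst).contains k)).foldl
      (fun d k => match pvResolver front back k with | some v => d.insert k v | none => d) PySem.Dict.empty).items = _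
    rw [pv_matchfold]
    set L := (front.map Prod.fst ++ (back.map Prod.fst).filter (fun k => !(front.map Prod.fst).contains k)).filterMap
        (fun k => (pvResolver front back k).map (fun v => (k, v))) with hL
    apply pv_items_of_nodup
    rw [hL, pv_map_fst_filterMap]
    apply List.Nodup.filter
    rw [List.nodup_append]
    refine ⟨hf, List.Nodup.filter _ hb, ?_⟩
    intro a ha b hbmem e
    have hq := List.of_mem_filter hbmem
    rw [← e] at hq
    simp [ha] at hq
  rw [hA, hg, List.filterMap_append]
  congr 1
  · -- front keys resolve to pvG of their entry
    rw [List.filterMap_map]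
    simp only [Function.comp_def]
    rw [List.filterMap_congr (fun p hp => pv_res_front front back p hf hp)]
    simp
  · -- fresh back keys resolve to their own truthy values
    rw [List.filter_map, List.filterMap_map]
    simp only [Function.comp_def]
    have hcg : ∀ p ∈ back.filter (fun p => !(front.map Prod.fst).contains p.1),
        (pvResolver front back p.1).map (fun v => (p.1, v))
          = if p.2 == "" then none else some p := by
      intro p hp
      have hpm := List.mem_of_mem_filter hp
      have hq := List.of_mem_filter hp
      have hnf : p.1 ∉ front.map Prod.fst := by
        simpa using hq
      exact pv_res_backonly front back p hb hpm hnf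
    rw [List.filterMap_congr hcg, pv_filterMap_if, List.filter_filter]

-- ===== VERDICT (by name: the statement is the Claim_ definition above) =====
theorem combinar_datos_spec : Claim_equal_combinar_datos := by
  intro front back _ hpre
  exact pv_main front back hpre.1 hpre.2
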